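-- pv_equiv track=rewrite | github.com/NimaDT/AoC2024 | 02/02b.py | safety_checker
-- ===== SOURCE A (Python) =====
-- def increaser(input):
--     statement = all(earlier < later for earlier, later in zip(input, input[1:]))
--     if statement == True:
--         for level in range(len(input) - 1):
--             if input[level + 1] - input[level] > 3:
--                 return False
--             else:
--                 continue
--         return True
--     else:
--         return False
--
-- def decreaser(input):
--     statement = all(earlier > later for earlier, later in zip(input, input[1:]))
--     if statement == True:
--         for level in range(len(input) - 1):
--             if input[level] - input[level + 1] > 3:
--                 return False
--             else:
--                 continue
--         return True
--     else:
--         return False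
--
-- def safety_checker(input):
--     safe_reports = []
--     reports_for_audit = []
--     for report in input:
--         if report[0] < report[1]:
--             assessment = increaser(report)
--             if assessment == True:
--                 safe_reports.append(report)
--             else:
--                 reports_for_audit.append(report)
--         elif report[0] > report[1]:
--             assessment = decreaser(report)
--             if assessment == True:
--                 safe_reports.append(report)
--             else:
--                 reports_for_audit.append(report)
--         else:
--             reports_for_audit.append(report)
--     return safe_reports, reports_for_audit
-- ===== SOURCE B (Python) =====
-- def safety_checker(input):
--     safe_reports = []
--     reports_for_audit = []
--     for report in input:
--         diffs = [b - a for a, b in zip(report, report[1:])]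
--         if all(1 <= d <= 3 for d in diffs) or all(-3 <= d <= -1 for d in diffs):
--             safe_reports.append(report)
--         else:
--             reports_for_audit.append(report)
--     return safe_reports, reports_for_audit
-- ===== Notes on version B (the rewrite author's own statement) =====
-- stated objective: simpler
-- what changed: Replaces the increaser/decreaser helpers and their two separate passes (a monotonicity all() over zipped pairs plus an index-based range loop over gaps) with a single consecutive-difference list per report and one combined interval predicate all(1<=d<=3) / all(-3<=d<=-1), dropping the three-way first-two-elements branching entirely.
import Mathlib
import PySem

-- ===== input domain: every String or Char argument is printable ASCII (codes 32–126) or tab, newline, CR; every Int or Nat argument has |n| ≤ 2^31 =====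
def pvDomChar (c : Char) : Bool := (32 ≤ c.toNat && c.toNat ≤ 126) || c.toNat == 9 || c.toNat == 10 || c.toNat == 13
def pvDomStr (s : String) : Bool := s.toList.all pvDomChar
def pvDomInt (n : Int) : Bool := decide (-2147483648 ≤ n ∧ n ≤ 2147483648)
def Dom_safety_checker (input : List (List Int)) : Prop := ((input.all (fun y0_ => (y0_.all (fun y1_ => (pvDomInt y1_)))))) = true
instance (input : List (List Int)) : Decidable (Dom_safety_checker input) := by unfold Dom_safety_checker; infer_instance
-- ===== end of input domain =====

-- B replaces the increaser/decreaser two-pass helpers with one per-report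
-- consecutive-difference list and a single interval predicate (objective: simpler).


-- ===== PORT A =====
-- the early-return 'for level in range(len(input)-1)' loop of increaser
def incLoop (r : List Int) : List Int → Bool
  | [] => true
  | l :: rest =>
      if PySem.List.pyGetD r (l + 1) 0 - PySem.List.pyGetD r l 0 > 3 then false
      else incLoop r rest

def increaser (r : List Int) : Bool :=
  let statement := (r.zip (r.drop 1)).all (fun p => decide (p.1 < p.2))
  if statement = true then incLoop r (PySem.List.pyRange 0 ((r.length : Int) - 1) 1)
  else false

-- the early-return loop of decreaser
def decLoop (r : List Int) : List Int → Bool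
  | [] => true
  | l :: rest =>
      if PySem.List.pyGetD r l 0 - PySem.List.pyGetD r (l + 1) 0 > 3 then false
      else decLoop r rest

def decreaser (r : List Int) : Bool :=
  let statement := (r.zip (r.drop 1)).all (fun p => decide (p.1 > p.2))
  if statement = true then decLoop r (PySem.List.pyRange 0 ((r.length : Int) - 1) 1)
  else false

-- the loop body of safety_checker; report[0]/report[1] raise IndexError on short
-- reports (excluded by Pre_); the none-branch value is arbitrary (unreachable on Pre_)
def classifyA (report : List Int) : Bool :=
  match PySem.List.pyGet? report 0, PySem.List.pyGet? report 1 with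
  | some r0, some r1 =>
      if r0 < r1 then increaser report
      else if r0 > r1 then decreaser report
      else false
  | _, _ => false

def safety_checker (input : List (List Int)) : List (List Int) × List (List Int) :=
  input.foldl
    (fun acc report =>
      if classifyA report = true then (acc.1 ++ [report], acc.2)
      else (acc.1, acc.2 ++ [report]))
    ([], [])

-- ===== PORT B =====
def safeB (report : List Int) : Bool :=
  let diffs := (report.zip (report.drop 1)).map (fun p => p.2 - p.1)
  diffs.all (fun d => decide (1 ≤ d ∧ d ≤ 3)) || diffs.all (fun d => decide (-3 ≤ d ∧ d ≤ -1))

def safety_checker_alt (input : List (List Int)) : List (List Int) × List (List Int) :=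
  input.foldl
    (fun acc report =>
      if safeB report then (acc.1 ++ [report], acc.2)
      else (acc.1, acc.2 ++ [report]))
    ([], [])

-- ===== PRECONDITION & SPEC =====
-- Pre_ excludes inputs containing a report with fewer than 2 levels: Python A raises
-- IndexError at report[0]/report[1] there.
def Pre_safety_checker (input : List (List Int)) : Prop :=
  ∀ r ∈ input, 2 ≤ r.length
instance (input : List (List Int)) : Decidable (Pre_safety_checker input) := by
  unfold Pre_safety_checker; infer_instance
def pvWitness_safety_checker : List (List Int) := [[1, 2, 4], [5, 1], [3, 3]]


def Spec_safety_checker (input : List (List Int)) (out : List (List Int) × List (List Int)) : Prop := out = safety_checker_alt input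
instance (input : List (List Int)) (out : List (List Int) × List (List Int)) : Decidable (Spec_safety_checker input out) := by unfold Spec_safety_checker; infer_instance

-- ===== CLAIM (what is proved, stated in full; the proofs are below) =====
def Claim_equal_safety_checker : Prop := ∀ (input : List (List Int)), Dom_safety_checker input → Pre_safety_checker input → Spec_safety_checker input (safety_checker input)

-- ===== LEMMAS AND PROOFS =====

theorem incLoop_eq (r : List Int) (k : Nat) :
    incLoop r (PySem.List.pyRange (k : Int) ((r.length : Int) - 1) 1)
      = ((r.drop k).zip (r.drop (k + 1))).all (fun p => decide (p.2 - p.1 ≤ 3)) := by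
  have H : ∀ n k, r.length - k ≤ n →
      incLoop r (PySem.List.pyRange (k : Int) ((r.length : Int) - 1) 1)
        = ((r.drop k).zip (r.drop (k + 1))).all (fun p => decide (p.2 - p.1 ≤ 3)) := by
    intro n
    induction n with
    | zero =>
        intro k hk
        rw [PySem.List.pyRange_one_eq_nil (by push_cast; omega)]
        rw [List.drop_eq_nil_of_le (show r.length ≤ k by omega)]
        simp [incLoop]
    | succ n ih =>
        intro k hk
        by_cases hlt : k + 1 < r.length
        · rw [PySem.List.pyRange_one_cons (by push_cast; omega)]
          have h1 : ((k : Int) + 1) = ((k + 1 : Nat) : Int) := by push_cast; ring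
          rw [incLoop, h1, PySem.List.pyGetD_natCast, PySem.List.pyGetD_natCast]
          rw [List.getD_eq_getElem r 0 (show k < r.length by omega),
              List.getD_eq_getElem r 0 (show k + 1 < r.length by omega)]
          rw [ih (k + 1) (by omega)]
          have hd1 : r.drop k = r[k] :: r.drop (k + 1) :=
            List.drop_eq_getElem_cons (show k < r.length by omega)
          have hd2 : r.drop (k + 1) = r[k + 1] :: r.drop (k + 2) := by
            have := List.drop_eq_getElem_cons (show k + 1 < r.length from hlt) (l := r)
            simpa using this
          rw [hd1, hd2, List.zip_cons_cons, List.all_cons]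
          by_cases hgt : r[k + 1] - r[k] > 3
          · rw [if_pos hgt]
            simp [show ¬((r[k], r[k+1]).2 - (r[k], r[k+1]).1 ≤ 3) from by simp; omega]
          · rw [if_neg hgt]
            have h3 : r.drop (k + 1 + 1) = r.drop (k + 2) := by norm_num
            rw [h3]
            simp [show (r[k], r[k+1]).2 - (r[k], r[k+1]).1 ≤ 3 from by simp; omega]
        · rw [PySem.List.pyRange_one_eq_nil (by push_cast; omega)]
          rw [List.drop_eq_nil_of_le (show r.length ≤ k + 1 by omega)]
          simp [incLoop]
  exact H r.length k (by omega)

theorem decLoop_eq (r : List Int) (k : Nat) :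
    decLoop r (PySem.List.pyRange (k : Int) ((r.length : Int) - 1) 1)
      = ((r.drop k).zip (r.drop (k + 1))).all (fun p => decide (p.1 - p.2 ≤ 3)) := by
  have H : ∀ n k, r.length - k ≤ n →
      decLoop r (PySem.List.pyRange (k : Int) ((r.length : Int) - 1) 1)
        = ((r.drop k).zip (r.drop (k + 1))).all (fun p => decide (p.1 - p.2 ≤ 3)) := by
    intro n
    induction n with
    | zero =>
        intro k hk
        rw [PySem.List.pyRange_one_eq_nil (by push_cast; omega)]
        rw [List.drop_eq_nil_of_le (show r.length ≤ k by omega)]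
        simp [decLoop]
    | succ n ih =>
        intro k hk
        by_cases hlt : k + 1 < r.length
        · rw [PySem.List.pyRange_one_cons (by push_cast; omega)]
          have h1 : ((k : Int) + 1) = ((k + 1 : Nat) : Int) := by push_cast; ring
          rw [decLoop, h1, PySem.List.pyGetD_natCast, PySem.List.pyGetD_natCast]
          rw [List.getD_eq_getElem r 0 (show k < r.length by omega),
              List.getD_eq_getElem r 0 (show k + 1 < r.length by omega)]
          rw [ih (k + 1) (by omega)]
          have hd1 : r.drop k = r[k] :: r.drop (k + 1) :=
            List.drop_eq_getElem_cons (show k < r.length by omega)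
          have hd2 : r.drop (k + 1) = r[k + 1] :: r.drop (k + 2) := by
            have := List.drop_eq_getElem_cons (show k + 1 < r.length from hlt) (l := r)
            simpa using this
          rw [hd1, hd2, List.zip_cons_cons, List.all_cons]
          by_cases hgt : r[k] - r[k + 1] > 3
          · rw [if_pos hgt]
            simp [show ¬((r[k], r[k+1]).1 - (r[k], r[k+1]).2 ≤ 3) from by simp; omega]
          · rw [if_neg hgt]
            have h3 : r.drop (k + 1 + 1) = r.drop (k + 2) := by norm_num
            rw [h3]
            simp [show (r[k], r[k+1]).1 - (r[k], r[k+1]).2 ≤ 3 from by simp; omega]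
        · rw [PySem.List.pyRange_one_eq_nil (by push_cast; omega)]
          rw [List.drop_eq_nil_of_le (show r.length ≤ k + 1 by omega)]
          simp [decLoop]
  exact H r.length k (by omega)

theorem increaser_eq (r : List Int) :
    increaser r = (r.zip (r.drop 1)).all (fun p => decide (1 ≤ p.2 - p.1 ∧ p.2 - p.1 ≤ 3)) := by
  have h := incLoop_eq r 0
  simp only [Nat.cast_zero, List.drop_zero, Nat.zero_add] at h
  unfold increaser
  by_cases hs : (r.zip (r.drop 1)).all (fun p => decide (p.1 < p.2)) = true
  · simp only [hs, if_pos, h]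
    rw [Bool.eq_iff_iff]
    simp only [List.all_eq_true, decide_eq_true_eq] at hs ⊢
    constructor
    · intro h' x hx; exact ⟨by have := hs x hx; omega, h' x hx⟩
    · intro h' x hx; exact (h' x hx).2
  · have hs' : ((r.zip (r.drop 1)).all (fun p => decide (p.1 < p.2))) = false := by
      simpa using hs
    simp only [hs']
    rw [if_neg (by simp : ¬(false = true))]
    rw [eq_comm, List.all_eq_false]
    simp only [List.all_eq_true, decide_eq_true_eq] at hs
    push_neg at hs
    obtain ⟨x, hx, hlt⟩ := hs
    exact ⟨x, hx, by simp; omega⟩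

theorem decreaser_eq (r : List Int) :
    decreaser r = (r.zip (r.drop 1)).all (fun p => decide (-3 ≤ p.2 - p.1 ∧ p.2 - p.1 ≤ -1)) := by
  have h := decLoop_eq r 0
  simp only [Nat.cast_zero, List.drop_zero, Nat.zero_add] at h
  unfold decreaser
  by_cases hs : (r.zip (r.drop 1)).all (fun p => decide (p.1 > p.2)) = true
  · simp only [hs, if_pos, h]
    rw [Bool.eq_iff_iff]
    simp only [List.all_eq_true, decide_eq_true_eq] at hs ⊢
    constructor
    · intro h' x hx
      have h1 := hs x hx; have h2 := h' x hx
      constructor <;> omega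
    · intro h' x hx
      have := (h' x hx); omega
  · have hs' : ((r.zip (r.drop 1)).all (fun p => decide (p.1 > p.2))) = false := by
      simpa using hs
    simp only [hs']
    rw [if_neg (by simp : ¬(false = true))]
    rw [eq_comm, List.all_eq_false]
    simp only [List.all_eq_true, decide_eq_true_eq] at hs
    push_neg at hs
    obtain ⟨x, hx, hlt⟩ := hs
    exact ⟨x, hx, by simp; omega⟩

theorem classify_eq (r : List Int) (h : 2 ≤ r.length) : classifyA r = safeB r := by
  match r, h with
  | a :: b :: t, _ =>
    have hget0 : PySem.List.pyGet? (a :: b :: t) 0 = some a := by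
      simp [PySem.List.pyGet?, PySem.List.pyIdx?,
        show ((0:Int) ≤ (t.length:Int) + 1) from by omega]
    have hget1 : PySem.List.pyGet? (a :: b :: t) 1 = some b := by
      simp [PySem.List.pyGet?, PySem.List.pyIdx?]
    have hpairs : (a :: b :: t).zip ((a :: b :: t).drop 1)
        = (a, b) :: ((b :: t).zip ((b :: t).drop 1)) := by
      cases t <;> simp
    have e1 : ((fun d => decide (1 ≤ d ∧ d ≤ 3)) ∘ fun (p : Int × Int) => p.2 - p.1)
        = fun p : Int × Int => decide (1 ≤ p.2 - p.1 ∧ p.2 - p.1 ≤ 3) := by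
      funext p; rfl
    have e2 : ((fun d => decide (-3 ≤ d ∧ d ≤ -1)) ∘ fun (p : Int × Int) => p.2 - p.1)
        = fun p : Int × Int => decide (-3 ≤ p.2 - p.1 ∧ p.2 - p.1 ≤ -1) := by
      funext p; rfl
    have hinc : increaser (a :: b :: t)
        = ((a :: b :: t).zip ((a :: b :: t).drop 1)).all
            (fun p => decide (1 ≤ p.2 - p.1 ∧ p.2 - p.1 ≤ 3)) := increaser_eq _
    have hdec : decreaser (a :: b :: t)
        = ((a :: b :: t).zip ((a :: b :: t).drop 1)).all
            (fun p => decide (-3 ≤ p.2 - p.1 ∧ p.2 - p.1 ≤ -1)) := decreaser_eq _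
    unfold classifyA safeB
    dsimp only
    rw [hget0, hget1]
    rw [List.all_map, List.all_map, e1, e2, ← hinc, ← hdec]
    dsimp only
    by_cases hab : a < b
    · rw [if_pos hab]
      have hd : decreaser (a :: b :: t) = false := by
        rw [hdec, hpairs, List.all_cons]
        have hx : decide (-3 ≤ (a, b).2 - (a, b).1 ∧ (a, b).2 - (a, b).1 ≤ -1) = false := by
          simp; omega
        rw [hx, Bool.false_and]
      rw [hd, Bool.or_false]
    · rw [if_neg hab]
      have hi : increaser (a :: b :: t) = false := by
        rw [hinc, hpairs, List.all_cons]
        have hx : decide (1 ≤ (a, b).2 - (a, b).1 ∧ (a, b).2 - (a, b).1 ≤ 3) = false := by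
          simp; omega
        rw [hx, Bool.false_and]
      by_cases hba : a > b
      · rw [if_pos hba, hi, Bool.false_or]
      · rw [if_neg hba, hi, Bool.false_or]
        have hd : decreaser (a :: b :: t) = false := by
          rw [hdec, hpairs, List.all_cons]
          have hx : decide (-3 ≤ (a, b).2 - (a, b).1 ∧ (a, b).2 - (a, b).1 ≤ -1) = false := by
            simp; omega
          rw [hx, Bool.false_and]
        rw [hd]

theorem fold_eq (input : List (List Int)) (hpre : ∀ r ∈ input, 2 ≤ r.length) :
    ∀ acc : List (List Int) × List (List Int),
      input.foldl (fun acc report =>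
          if classifyA report = true then (acc.1 ++ [report], acc.2)
          else (acc.1, acc.2 ++ [report])) acc
        = input.foldl (fun acc report =>
            if safeB report then (acc.1 ++ [report], acc.2)
            else (acc.1, acc.2 ++ [report])) acc := by
  induction input with
  | nil => intro acc; rfl
  | cons r t ih =>
      intro acc
      simp only [List.foldl_cons]
      rw [classify_eq r (hpre r (List.mem_cons_self ..))]
      exact ih (fun x hx => hpre x (List.mem_cons_of_mem _ hx)) _


-- ===== VERDICT (by name: the statement is the Claim_ definition above) =====
theorem safety_checker_spec : Claim_equal_safety_checker := by
  intro input _ hpre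
  unfold Spec_safety_checker safety_checker safety_checker_alt
  exact fold_eq input hpre ([], [])
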